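-- pv_equiv track=rewrite | github.com/elpuma4k/TareasEstructurasDeDatos | tarea1.py | verificarDiagonales
-- ===== SOURCE A (Python) =====
-- def verificarDiagonales(matriz):
--     ans, lista1, lista2 = False, [], []
--     for i in range(len(matriz)):
--         lista1.append(matriz[i][i])
--     for i in range(len(matriz)):
--         lista2.append(matriz[i][len(matriz)-i-1])
--     if lista1 == lista2:
--         ans = True
--     return ans
-- ===== SOURCE B (Python) =====
-- def verificarDiagonales(matriz):
--     n = len(matriz)
--     for i, fila in enumerate(matriz):
--         if fila[i] != fila[n - 1 - i]:
--             return False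
--     return True
-- ===== Notes on version B (the rewrite author's own statement) =====
-- stated objective: simpler
-- what changed: Instead of building two diagonal lists in two index loops and comparing them at the end, B makes a single enumerate pass comparing matriz[i][i] with matriz[i][n-1-i] and returns False at the first mismatch.
import Mathlib
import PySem

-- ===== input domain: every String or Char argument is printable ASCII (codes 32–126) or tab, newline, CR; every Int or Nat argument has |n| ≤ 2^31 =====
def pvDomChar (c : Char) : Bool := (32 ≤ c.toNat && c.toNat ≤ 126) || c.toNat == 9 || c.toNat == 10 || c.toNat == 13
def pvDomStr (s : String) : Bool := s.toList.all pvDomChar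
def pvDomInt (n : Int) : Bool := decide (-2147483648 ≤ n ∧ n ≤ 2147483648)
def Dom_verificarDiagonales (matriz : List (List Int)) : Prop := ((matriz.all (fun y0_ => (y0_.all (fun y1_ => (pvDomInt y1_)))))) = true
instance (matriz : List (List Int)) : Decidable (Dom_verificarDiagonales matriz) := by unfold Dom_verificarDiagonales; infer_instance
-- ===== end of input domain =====

-- B differs from A only in structure (single early-exit pass, no auxiliary lists).

-- ===== PORT A =====
-- two index loops append matriz[i][i] resp. matriz[i][len-i-1] to lista1/lista2, then compare
def verificarDiagonales (matriz : List (List Int)) : Bool :=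
  let n : Int := matriz.length
  let lista1 := (PySem.List.pyRange 0 n 1).foldl
    (fun acc i => acc ++ [PySem.List.pyGetD (PySem.List.pyGetD matriz i []) i 0]) []
  let lista2 := (PySem.List.pyRange 0 n 1).foldl
    (fun acc i => acc ++ [PySem.List.pyGetD (PySem.List.pyGetD matriz i []) (n - i - 1) 0]) []
  if lista1 == lista2 then true else false

-- ===== PORT B =====
-- single pass over the rows (enumerate), early exit on the first mismatch
def verificarDiagonalesGo (n : Int) : List (List Int) → Int → Bool
  | [], _ => true
  | fila :: rest, i =>
      if PySem.List.pyGetD fila i 0 ≠ PySem.List.pyGetD fila (n - 1 - i) 0 then false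
      else verificarDiagonalesGo n rest (i + 1)

def verificarDiagonales_alt (matriz : List (List Int)) : Bool :=
  verificarDiagonalesGo (matriz.length : Int) matriz 0

-- ===== PRECONDITION & SPEC =====
-- Pre_ excludes exactly the inputs where the Python A raises IndexError: some row i is too
-- short to hold both diagonal entries i and len-1-i.
def Pre_verificarDiagonales (matriz : List (List Int)) : Prop :=
  ((List.range matriz.length).all (fun i =>
    decide (i < (matriz.getD i []).length ∧ matriz.length - 1 - i < (matriz.getD i []).length))) = true
instance (matriz : List (List Int)) : Decidable (Pre_verificarDiagonales matriz) := by
  unfold Pre_verificarDiagonales; infer_instance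

def pvWitness_verificarDiagonales : List (List Int) := [[1, 2], [2, 1]]

def Spec_verificarDiagonales (matriz : List (List Int)) (out : Bool) : Prop := out = verificarDiagonales_alt matriz
instance (matriz : List (List Int)) (out : Bool) : Decidable (Spec_verificarDiagonales matriz out) := by unfold Spec_verificarDiagonales; infer_instance

-- ===== CLAIM (what is proved, stated in full; the proofs are below) =====
def Claim_equal_verificarDiagonales : Prop := ∀ (matriz : List (List Int)), Dom_verificarDiagonales matriz → Pre_verificarDiagonales matriz → Spec_verificarDiagonales matriz (verificarDiagonales matriz)

-- ===== LEMMAS AND PROOFS =====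

-- B's loop over the remaining rows equals the comparison of the remaining segments of A's two maps
lemma go_eq_maps (m : List (List Int)) :
    ∀ fuel i, m.length - i ≤ fuel →
      verificarDiagonalesGo (m.length : Int) (m.drop i) (i : Int) =
        (((PySem.List.pyRange (i : Int) (m.length : Int) 1).map
            (fun j => PySem.List.pyGetD (PySem.List.pyGetD m j []) j 0)) ==
         ((PySem.List.pyRange (i : Int) (m.length : Int) 1).map
            (fun j => PySem.List.pyGetD (PySem.List.pyGetD m j []) ((m.length : Int) - j - 1) 0))) := by
  intro fuel
  induction fuel with
  | zero =>
      intro i h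
      have hi : m.length ≤ i := by omega
      rw [List.drop_eq_nil_of_le hi,
        PySem.List.pyRange_one_eq_nil (by exact_mod_cast hi)]
      rfl
  | succ k ih =>
      intro i h
      by_cases hi : i < m.length
      · have hdrop : m.drop i = m[i] :: m.drop (i + 1) := List.drop_eq_getElem_cons hi
        rw [hdrop, PySem.List.pyRange_one_cons (by exact_mod_cast hi)]
        have hget : PySem.List.pyGetD m (i : Int) [] = m[i] := by
          rw [PySem.List.pyGetD_natCast]; simp [hi]
        simp only [List.map_cons, verificarDiagonalesGo, hget]
        rw [show (m.length : Int) - (i : Int) - 1 = (m.length : Int) - 1 - (i : Int) by ring]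
        split_ifs with hne
        · rw [List.cons_beq_cons, beq_eq_false_iff_ne.mpr hne]
          simp
        · push Not at hne
          rw [show (i : Int) + 1 = ((i + 1 : Nat) : Int) by push_cast; ring,
            ih (i + 1) (by omega), List.cons_beq_cons, hne]
          simp
      · have hle : m.length ≤ i := by omega
        rw [List.drop_eq_nil_of_le hle,
          PySem.List.pyRange_one_eq_nil (by exact_mod_cast hle)]
        rfl

-- ===== VERDICT (by name: the statement is the Claim_ definition above) =====
theorem verificarDiagonales_spec : Claim_equal_verificarDiagonales := by
  intro m _ _
  show verificarDiagonales m = verificarDiagonales_alt m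
  simp only [verificarDiagonales, verificarDiagonales_alt,
    PySem.List.foldl_append_singleton_eq_map]
  have h := go_eq_maps m m.length 0 (by omega)
  simp only [List.drop_zero, Nat.cast_zero] at h
  rw [h]
  cases hb : (List.map (fun j => PySem.List.pyGetD (PySem.List.pyGetD m j []) j 0)
      (PySem.List.pyRange 0 (m.length : Int) 1) ==
    List.map (fun j => PySem.List.pyGetD (PySem.List.pyGetD m j []) ((m.length : Int) - j - 1) 0)
      (PySem.List.pyRange 0 (m.length : Int) 1)) <;> simp [hb]
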